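-- pv_equiv track=rewrite | github.com/siddheshparab309/Fast-response-k-server-problem-using-DP- | k-server.py | k_server_dp
-- ===== SOURCE A (Python) =====
-- def compute_costs(w):
--     n = len(w)
--     cost = [[0] * n for _ in range(n)]
--
--     prefix_w = [0] * (n + 1)
--     prefix_wi = [0] * (n + 1)
--
--     for i in range(1, n + 1):
--         prefix_w[i] = prefix_w[i - 1] + w[i - 1]
--         prefix_wi[i] = prefix_wi[i - 1] + w[i - 1] * i
--
--     for l in range(1, n + 1):
--         for r in range(l, n + 1):
--             mid = (l + r) // 2
--
--             wl = prefix_w[mid] - prefix_w[l - 1]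
--             wr = prefix_w[r]   - prefix_w[mid]
--             cl = wl * mid - (prefix_wi[mid] - prefix_wi[l - 1])
--             cr = (prefix_wi[r] - prefix_wi[mid]) - wr * mid
--
--             cost[l - 1][r - 1] = cl + cr
--
--     return cost
--
-- def k_server_dp(w, k):
--     n = len(w)
--     cost = compute_costs(w)
--
--     INF = 10**18
--     DP = [[INF] * (k + 1) for _ in range(n + 1)]
--     DP[0][0] = 0
--
--     for i in range(1, n + 1):
--         for j in range(1, k + 1):
--             for t in range(i):
--                 DP[i][j] = min(DP[i][j], DP[t][j - 1] + cost[t][i - 1])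
--
--     return DP[n][k]
-- ===== SOURCE B (Python) =====
-- def k_server_dp(w, k):
--     n = len(w)
--     INF = 10 ** 18
--     # Segment costs by sliding the median as the segment grows to the right:
--     # running left/right mass around the median, no prefix-sum tables.
--     cost = []
--     for l in range(n):
--         row = [0] * n
--         m, c = l, 0
--         left, right = w[l], 0
--         for r in range(l + 1, n):
--             if (l + r) % 2 == 0:
--                 c += left - right + w[r] * (r - 1 - m)
--                 m += 1
--                 left += w[m]
--                 right += w[r] - w[m]
--             else:
--                 c += w[r] * (r - m)
--                 right += w[r]
--             row[r] = c
--         cost.append(row)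
--     # Layered min-plus iteration with two rolling 1-D vectors.
--     prev = [0] + [INF] * n
--     for _ in range(k):
--         cur = [INF] * (n + 1)
--         for i in range(1, n + 1):
--             best = INF
--             for t in range(i):
--                 v = prev[t] + cost[t][i - 1]
--                 if v < best:
--                     best = v
--             cur[i] = best
--         prev = cur
--     return prev[n]
-- ===== Notes on version B (the rewrite author's own statement) =====
-- stated objective: alternative
-- what changed: B replaces A's closed-form prefix-sum cost table and i-major triple-loop in-place relaxation of an (n+1)x(k+1) table by a sliding-median sweep that builds each cost row incrementally from running left/right masses, followed by a layer-major min-plus iteration keeping only two rolling 1-D vectors with a scalar running minimum.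
import Mathlib
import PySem

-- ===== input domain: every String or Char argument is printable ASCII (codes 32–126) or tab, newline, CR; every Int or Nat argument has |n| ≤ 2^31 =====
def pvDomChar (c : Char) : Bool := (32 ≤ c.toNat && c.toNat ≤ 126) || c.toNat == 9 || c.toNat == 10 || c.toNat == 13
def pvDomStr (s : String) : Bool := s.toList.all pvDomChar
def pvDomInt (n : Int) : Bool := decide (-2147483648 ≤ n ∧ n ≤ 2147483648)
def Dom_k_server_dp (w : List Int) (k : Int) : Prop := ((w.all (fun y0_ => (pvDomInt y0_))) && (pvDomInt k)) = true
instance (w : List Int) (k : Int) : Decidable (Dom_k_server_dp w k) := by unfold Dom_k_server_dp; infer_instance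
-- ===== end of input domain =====

-- B replaces A's prefix-sum cost table + i-major in-place 2-D DP relaxation by a sliding-median
-- cost sweep and a layer-major min-plus iteration on two rolling 1-D vectors (alternative algorithm).

def pvINF : Int := 10^18

-- matrix cell read m[i][j] (all reads in both programs are in range, so getD is exact)
def pvGet2 (m : List (List Int)) (i j : Nat) : Int := (m.getD i []).getD j 0
-- matrix cell write m[i][j] = v
def pvSet2 (m : List (List Int)) (i j : Nat) (v : Int) : List (List Int) :=
  m.set i ((m.getD i []).set j v)

-- ===== PORT A =====
-- Python loop indices range(1, n+1) etc. are the nonnegative integers 1..n; they are iterated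
-- here as i0+1 for i0 over List.range n (the same sequence, exact).  (l+r)//2 on positive
-- operands equals Nat division.  k+1 columns: for k ≥ 0 (Pre_) k.toNat = k, exact.
def k_server_dp (w : List Int) (k : Int) : Int :=
  let n := w.length
  let pw := (List.range n).foldl
    (fun p i0 => p.set (i0+1) (p.getD i0 0 + w.getD i0 0)) (List.replicate (n+1) 0)
  let pwi := (List.range n).foldl
    (fun p i0 => p.set (i0+1) (p.getD i0 0 + w.getD i0 0 * ((i0:Int)+1))) (List.replicate (n+1) 0)
  let cost := (List.range n).foldl (fun c l0 =>
      let l := l0 + 1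
      (List.range (n+1-l)).foldl (fun c r0 =>
        let r := l + r0
        let mid := (l + r) / 2
        let wl := pw.getD mid 0 - pw.getD (l-1) 0
        let wr := pw.getD r 0 - pw.getD mid 0
        let cl := wl * (mid:Int) - (pwi.getD mid 0 - pwi.getD (l-1) 0)
        let cr := (pwi.getD r 0 - pwi.getD mid 0) - wr * (mid:Int)
        pvSet2 c (l-1) (r-1) (cl + cr)) c)
    (List.replicate n (List.replicate n 0))
  let K := k.toNat
  let DP0 := pvSet2 (List.replicate (n+1) (List.replicate (K+1) pvINF)) 0 0 0
  let DP := (List.range n).foldl (fun D i0 =>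
      let i := i0 + 1
      (List.range K).foldl (fun D j0 =>
        let j := j0 + 1
        (List.range i).foldl (fun D t =>
          pvSet2 D i j (min (pvGet2 D i j) (pvGet2 D t (j-1) + pvGet2 cost t (i-1)))) D) D) DP0
  pvGet2 DP n K

-- ===== PORT B =====
-- Source B's inner sweep body, one step per new right end r = l+1+q: state (median m, cost c,
-- left mass, right mass, row); the branch test (l+r) % 2 == 0 and the updates are literal.
def pvRowStep (w : List Int) (l : Nat) (st : Nat × Int × Int × Int × List Int) (q : Nat) :
    Nat × Int × Int × Int × List Int :=
  let r := l + 1 + q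
  let m := st.1
  let c := st.2.1
  let left := st.2.2.1
  let right := st.2.2.2.1
  let row := st.2.2.2.2
  if (l + r) % 2 = 0 then
    let c' := c + left - right + w.getD r 0 * ((r:Int) - 1 - (m:Int))
    let m' := m + 1
    let left' := left + w.getD m' 0
    let right' := right + w.getD r 0 - w.getD m' 0
    (m', c', left', right', row.set r c')
  else
    let c' := c + w.getD r 0 * ((r:Int) - (m:Int))
    (m, c', left, right + w.getD r 0, row.set r c')

-- for r in range(l+1, n) is iterated as r = l+1+q, q over List.range (n-(l+1)) (same sequence);
-- range(k) runs k.toNat times (0 for k < 0, as in Python); 'if v < best' is kept literally.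
def k_server_dp_alt (w : List Int) (k : Int) : Int :=
  let n := w.length
  let cost := (List.range n).foldl (fun cost l =>
    let st := (List.range (n - (l+1))).foldl (pvRowStep w l)
      (l, (0:Int), w.getD l 0, (0:Int), List.replicate n (0:Int))
    cost ++ [st.2.2.2.2]) ([] : List (List Int))
  let prev0 := (0:Int) :: List.replicate n pvINF
  let prev := (List.range k.toNat).foldl (fun prev _ =>
      (List.range n).foldl (fun cur i0 =>
        let i := i0 + 1
        let best := (List.range i).foldl (fun best t =>
          let v := prev.getD t 0 + pvGet2 cost t (i-1)
          if v < best then v else best) pvINF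
        cur.set i best) (List.replicate (n+1) pvINF)) prev0
  prev.getD n 0

-- ===== PRECONDITION & SPEC =====
-- Pre_ excludes k < 0, on which Python A raises IndexError (DP[0][0] on a table with 0 columns).
def Pre_k_server_dp (w : List Int) (k : Int) : Prop := 0 ≤ k
instance (w : List Int) (k : Int) : Decidable (Pre_k_server_dp w k) := by
  unfold Pre_k_server_dp; infer_instance
def pvWitness_k_server_dp : List Int × Int := ([1, -2, 3], 2)

def Spec_k_server_dp (w : List Int) (k : Int) (out : Int) : Prop := out = k_server_dp_alt w k
instance (w : List Int) (k : Int) (out : Int) : Decidable (Spec_k_server_dp w k out) := by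
  unfold Spec_k_server_dp; infer_instance

-- ===== CLAIM (what is proved, stated in full; the proofs are below) =====
def Claim_equal_k_server_dp : Prop := ∀ (w : List Int) (k : Int), Dom_k_server_dp w k →
  Pre_k_server_dp w k → Spec_k_server_dp w k (k_server_dp w k)

-- ===== LEMMAS AND PROOFS =====

theorem pv_getD_map_range {α : Type} (f : Nat → α) (N j : Nat) (d : α) :
    (((List.range N).map f).getD j d) = if j < N then f j else d := by
  by_cases h : j < N
  · simp [List.getD_eq_getElem?_getD, h]
  · rw [List.getD_eq_getElem?_getD, List.getElem?_eq_none (by simpa using Nat.le_of_not_lt h)]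
    simp [h]

theorem pv_set_map_range {α : Type} (f : Nat → α) (N j : Nat) (v : α) :
    ((List.range N).map f).set j v
      = (List.range N).map (fun x => if x = j then v else f x) := by
  apply List.ext_getElem
  · simp
  · intro i h1 h2
    simp at h2
    simp [List.getElem_set]
    rcases eq_or_ne i j with rfl | hne
    · simp
    · simp [hne, Ne.symm hne]

def pvMM (R C : Nat) (g : Nat → Nat → Int) : List (List Int) :=
  (List.range R).map (fun a => (List.range C).map (g a))

theorem pvGet2_MM (R C : Nat) (g : Nat → Nat → Int) (i j : Nat) :
    pvGet2 (pvMM R C g) i j = if i < R ∧ j < C then g i j else 0 := by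
  unfold pvGet2 pvMM
  rw [pv_getD_map_range]
  by_cases hi : i < R
  · rw [if_pos hi, pv_getD_map_range]
    simp [hi]
  · simp [hi]

theorem pvSet2_MM (R C : Nat) (g : Nat → Nat → Int) (i j : Nat) (v : Int) :
    pvSet2 (pvMM R C g) i j v = pvMM R C (fun a b => if a = i ∧ b = j then v else g a b) := by
  unfold pvSet2 pvMM
  rw [pv_getD_map_range]
  by_cases hi : i < R
  · simp only [hi, if_pos]
    rw [pv_set_map_range, pv_set_map_range]
    apply List.map_congr_left
    intro a ha
    rcases eq_or_ne a i with rfl | hne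
    · simp
    · simp only [if_neg hne]
      apply List.map_congr_left
      intro b hb
      simp [hne]
  · have : ((List.range R).map fun a => (List.range C).map (g a)).set i (([] : List Int).set j v) = (List.range R).map fun a => (List.range C).map (g a) := by
      apply List.set_eq_of_length_le
      simpa using Nat.le_of_not_lt hi
    rw [if_neg hi, this]
    apply List.map_congr_left
    intro a ha
    apply List.map_congr_left
    intro b hb
    have : a ≠ i := by simp at ha; omega
    simp [this]

theorem pvMM_congr (R C : Nat) (g g' : Nat → Nat → Int)
    (h : ∀ a < R, ∀ b < C, g a b = g' a b) : pvMM R C g = pvMM R C g' := by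
  unfold pvMM
  apply List.map_congr_left
  intro a ha
  apply List.map_congr_left
  intro b hb
  exact h a (by simpa using ha) b (by simpa using hb)

theorem pvMM_const (R C : Nat) (x : Int) :
    List.replicate R (List.replicate C x) = pvMM R C (fun _ _ => x) := by
  unfold pvMM
  apply List.ext_getElem
  · simp
  · intro i h1 h2
    simp [List.eq_replicate_iff]

-- generic prefix-sum loop
def pvPS (v : Nat → Int) (i : Nat) : Int := ((List.range i).map v).sum

theorem pvPS_succ (v : Nat → Int) (m : Nat) : pvPS v (m+1) = pvPS v m + v m := by
  simp [pvPS, List.range_succ]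

theorem pv_prefix_inv (v : Nat → Int) (n m : Nat) (hm : m ≤ n) :
    (List.range m).foldl (fun p i0 => p.set (i0+1) (p.getD i0 0 + v i0))
      (List.replicate (n+1) 0)
    = (List.range (n+1)).map (fun i => if i ≤ m then pvPS v i else 0) := by
  induction m with
  | zero =>
    simp only [List.range_zero, List.foldl_nil]
    apply List.ext_getElem
    · simp
    · intro i h1 h2
      simp at h1 ⊢
      rcases Nat.eq_zero_or_pos i with rfl | hi
      · simp [pvPS]
      · simp [Nat.pos_iff_ne_zero.mp hi]
  | succ m ih =>
    rw [List.range_succ, List.foldl_append, ih (by omega)]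
    simp only [List.foldl_cons, List.foldl_nil]
    rw [pv_getD_map_range, pv_set_map_range]
    apply List.map_congr_left
    intro i hi
    simp at hi
    have hmN : m < n + 1 := by omega
    simp only [if_pos hmN]
    rcases eq_or_ne i (m+1) with rfl | hne
    · simp [pvPS_succ]
    · by_cases him : i ≤ m
      · simp [hne, him, Nat.le_succ_of_le him]
      · simp [hne, fun h => him (by omega : i ≤ m)]
        omega

def pvSw (w : List Int) (i : Nat) : Int := pvPS (fun t => w.getD t 0) i
def pvSIw (w : List Int) (i : Nat) : Int := pvPS (fun t => w.getD t 0 * ((t:Int)+1)) i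

def pvCostF (w : List Int) (l r : Nat) : Int :=
  (pvSw w ((l + r) / 2) - pvSw w (l - 1)) * (((l + r) / 2 : Nat) : Int) -
    (pvSIw w ((l + r) / 2) - pvSIw w (l - 1)) +
    (pvSIw w r - pvSIw w ((l + r) / 2) -
      (pvSw w r - pvSw w ((l + r) / 2)) * (((l + r) / 2 : Nat) : Int))

def pvF (w : List Int) : Nat → Nat → Int
  | 0, a => if a = 0 then 0 else pvINF
  | b+1, a => if a = 0 then pvINF else
      (List.range a).foldl (fun acc t => min acc (pvF w b t + pvCostF w (t+1) a)) pvINF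

def pvPmin (w : List Int) (c i s : Nat) : Int :=
  (List.range s).foldl (fun acc t => min acc (pvF w c t + pvCostF w (t+1) i)) pvINF

theorem pvF_succ_pos (w : List Int) (c i : Nat) (hi : i ≠ 0) :
    pvF w (c+1) i = pvPmin w c i i := by
  simp [pvF, pvPmin, hi]

theorem pvF_arg_zero (w : List Int) (b : Nat) :
    pvF w b 0 = if b = 0 then 0 else pvINF := by
  cases b <;> simp [pvF]

theorem pvPmin_succ (w : List Int) (c i s : Nat) :
    pvPmin w c i (s+1) = min (pvPmin w c i s) (pvF w c s + pvCostF w (s+1) i) := by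
  simp [pvPmin, List.range_succ]

def pvH (w : List Int) (m : Nat) : Nat → Nat → Int :=
  fun a b => if a ≤ m then pvF w b a else pvINF
def pvH2 (w : List Int) (m c : Nat) : Nat → Nat → Int :=
  fun a b => if a ≤ m then pvF w b a else if a = m+1 ∧ b ≤ c then pvF w b a else pvINF

theorem pv_pw_eq (w : List Int) :
    List.foldl (fun p i0 => p.set (i0+1) (p.getD i0 0 + w.getD i0 0))
      (List.replicate (w.length+1) 0) (List.range w.length)
    = (List.range (w.length+1)).map (fun i => if i ≤ w.length then pvSw w i else 0) := by
  have := pv_prefix_inv (fun t => w.getD t 0) w.length w.length le_rfl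
  simpa [pvSw] using this

theorem pv_pwi_eq (w : List Int) :
    List.foldl (fun p i0 => p.set (i0+1) (p.getD i0 0 + w.getD i0 0 * ((i0:Int)+1)))
      (List.replicate (w.length+1) 0) (List.range w.length)
    = (List.range (w.length+1)).map (fun i => if i ≤ w.length then pvSIw w i else 0) := by
  have := pv_prefix_inv (fun t => w.getD t 0 * ((t:Int)+1)) w.length w.length le_rfl
  simpa [pvSIw] using this

theorem pv_if_getD (f : Nat → Int) (n j : Nat) :
    (((List.range (n+1)).map (fun i => if i ≤ n then f i else 0)).getD j 0)
      = if j ≤ n then f j else 0 := by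
  rw [pv_getD_map_range]
  by_cases h : j ≤ n
  · simp [h, Nat.lt_succ_of_le h]
  · simp [h, (by omega : ¬ (j < n+1))]

theorem pv_costrow_inv (w pw pwi : List Int)
    (hpw : ∀ j, pw.getD j 0 = if j ≤ w.length then pvSw w j else 0)
    (hpwi : ∀ j, pwi.getD j 0 = if j ≤ w.length then pvSIw w j else 0)
    (l0 : Nat) (hl : l0 < w.length) (g : Nat → Nat → Int) (p : Nat) (hp : p ≤ w.length - l0) :
    List.foldl (fun c r0 =>
        pvSet2 c (l0 + 1 - 1) (l0 + 1 + r0 - 1)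
          ((pw.getD ((l0 + 1 + (l0 + 1 + r0)) / 2) 0 - pw.getD (l0 + 1 - 1) 0) *
              ((((l0 + 1 + (l0 + 1 + r0)) / 2 : Nat)) : Int) -
            (pwi.getD ((l0 + 1 + (l0 + 1 + r0)) / 2) 0 - pwi.getD (l0 + 1 - 1) 0) +
            (pwi.getD (l0 + 1 + r0) 0 - pwi.getD ((l0 + 1 + (l0 + 1 + r0)) / 2) 0 -
              (pw.getD (l0 + 1 + r0) 0 - pw.getD ((l0 + 1 + (l0 + 1 + r0)) / 2) 0) *
                ((((l0 + 1 + (l0 + 1 + r0)) / 2 : Nat)) : Int))))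
      (pvMM w.length w.length g) (List.range p)
    = pvMM w.length w.length
        (fun a b => if a = l0 ∧ l0 ≤ b ∧ b < l0 + p then pvCostF w (a+1) (b+1) else g a b) := by
  induction p with
  | zero =>
    simp only [List.range_zero, List.foldl_nil]
    apply pvMM_congr
    intro a ha b hb
    simp [(by omega : ¬ (a = l0 ∧ l0 ≤ b ∧ b < l0 + 0))]
  | succ p ih =>
    rw [List.range_succ, List.foldl_append, ih (by omega)]
    simp only [List.foldl_cons, List.foldl_nil]
    have h1 : (l0 + 1 + (l0 + 1 + p)) / 2 ≤ w.length := by omega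
    have h2 : l0 + 1 - 1 ≤ w.length := by omega
    have h3 : l0 + 1 + p ≤ w.length := by omega
    rw [hpw, hpw, hpw, hpwi, hpwi, hpwi, if_pos h1, if_pos h2, if_pos h3,
      if_pos h1, if_pos h2, if_pos h3]
    rw [pvSet2_MM]
    apply pvMM_congr
    intro a ha b hb
    by_cases hab : a = l0 + 1 - 1 ∧ b = l0 + 1 + p - 1
    · rw [if_pos hab]
      obtain ⟨ha', hb'⟩ := hab
      rw [if_pos (by omega : a = l0 ∧ l0 ≤ b ∧ b < l0 + (p+1))]
      have e1 : a + 1 = l0 + 1 := by omega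
      have e2 : b + 1 = l0 + 1 + p := by omega
      rw [e1, e2]
      rfl
    · rw [if_neg hab]
      by_cases hold : a = l0 ∧ l0 ≤ b ∧ b < l0 + p
      · rw [if_pos hold, if_pos (by omega : a = l0 ∧ l0 ≤ b ∧ b < l0 + (p+1))]
      · rw [if_neg hold, if_neg (by omega : ¬ (a = l0 ∧ l0 ≤ b ∧ b < l0 + (p+1)))]

theorem pv_cost_inv (w pw pwi : List Int)
    (hpw : ∀ j, pw.getD j 0 = if j ≤ w.length then pvSw w j else 0)
    (hpwi : ∀ j, pwi.getD j 0 = if j ≤ w.length then pvSIw w j else 0)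
    (m : Nat) (hm : m ≤ w.length) :
    List.foldl (fun c l0 =>
      List.foldl (fun c r0 =>
        pvSet2 c (l0 + 1 - 1) (l0 + 1 + r0 - 1)
          ((pw.getD ((l0 + 1 + (l0 + 1 + r0)) / 2) 0 - pw.getD (l0 + 1 - 1) 0) *
              ((((l0 + 1 + (l0 + 1 + r0)) / 2 : Nat)) : Int) -
            (pwi.getD ((l0 + 1 + (l0 + 1 + r0)) / 2) 0 - pwi.getD (l0 + 1 - 1) 0) +
            (pwi.getD (l0 + 1 + r0) 0 - pwi.getD ((l0 + 1 + (l0 + 1 + r0)) / 2) 0 -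
              (pw.getD (l0 + 1 + r0) 0 - pw.getD ((l0 + 1 + (l0 + 1 + r0)) / 2) 0) *
                ((((l0 + 1 + (l0 + 1 + r0)) / 2 : Nat)) : Int))))
        c (List.range (w.length + 1 - (l0 + 1))))
      (List.replicate w.length (List.replicate w.length 0)) (List.range m)
    = pvMM w.length w.length
        (fun a b => if a < m ∧ a ≤ b then pvCostF w (a+1) (b+1) else 0) := by
  induction m with
  | zero =>
    simp only [List.range_zero, List.foldl_nil]
    rw [pvMM_const]
    apply pvMM_congr
    intro a ha b hb
    simp
  | succ m ih =>
    rw [List.range_succ, List.foldl_append, ih (by omega)]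
    simp only [List.foldl_cons, List.foldl_nil]
    rw [pv_costrow_inv w pw pwi hpw hpwi m (by omega) _ (w.length + 1 - (m + 1)) (by omega)]
    apply pvMM_congr
    intro a ha b hb
    by_cases h1 : a = m ∧ m ≤ b ∧ b < m + (w.length + 1 - (m + 1))
    · rw [if_pos h1, if_pos (by omega : a < m + 1 ∧ a ≤ b)]
    · rw [if_neg h1]
      by_cases h2 : a < m ∧ a ≤ b
      · rw [if_pos h2, if_pos (by omega : a < m + 1 ∧ a ≤ b)]
      · rw [if_neg h2, if_neg (by omega : ¬ (a < m + 1 ∧ a ≤ b))]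

theorem pv_cost_getD (w pw pwi : List Int)
    (hpw : ∀ j, pw.getD j 0 = if j ≤ w.length then pvSw w j else 0)
    (hpwi : ∀ j, pwi.getD j 0 = if j ≤ w.length then pvSIw w j else 0)
    (t i0 : Nat) (ht : t ≤ i0) (hi : i0 < w.length) :
    pvGet2 (pvMM w.length w.length
        (fun a b => if a < w.length ∧ a ≤ b then pvCostF w (a+1) (b+1) else 0)) t (i0 + 1 - 1)
      = pvCostF w (t+1) (i0+1) := by
  rw [pvGet2_MM, if_pos (by omega : t < w.length ∧ i0 + 1 - 1 < w.length),
    if_pos (by omega : t < w.length ∧ t ≤ i0 + 1 - 1)]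
  congr 1

theorem pv_dp_inner (w : List Int) (K : Nat) (cost : List (List Int))
    (hcost : ∀ t i0, t ≤ i0 → i0 < w.length →
      pvGet2 cost t (i0 + 1 - 1) = pvCostF w (t+1) (i0+1))
    (m j0 : Nat) (hm : m < w.length) (hj : j0 < K) (s : Nat) (hs : s ≤ m + 1) :
    List.foldl (fun D t =>
        pvSet2 D (m + 1) (j0 + 1)
          (min (pvGet2 D (m + 1) (j0 + 1))
            (pvGet2 D t (j0 + 1 - 1) + pvGet2 cost t (m + 1 - 1))))
      (pvMM (w.length + 1) (K + 1) (pvH2 w m j0)) (List.range s)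
    = pvMM (w.length + 1) (K + 1)
        (fun a b => if a = m + 1 ∧ b = j0 + 1 then pvPmin w j0 (m+1) s else pvH2 w m j0 a b) := by
  induction s with
  | zero =>
    simp only [List.range_zero, List.foldl_nil]
    apply pvMM_congr
    intro a ha b hb
    by_cases h : a = m + 1 ∧ b = j0 + 1
    · rw [if_pos h]
      simp [pvH2, pvPmin, h.1, h.2]
    · rw [if_neg h]
  | succ s ih =>
    rw [List.range_succ, List.foldl_append, ih (by omega)]
    simp only [List.foldl_cons, List.foldl_nil]
    rw [pvGet2_MM, if_pos (by omega : m + 1 < w.length + 1 ∧ j0 + 1 < K + 1),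
      if_pos (by trivial : m + 1 = m + 1 ∧ j0 + 1 = j0 + 1)]
    rw [pvGet2_MM, if_pos (by omega : s < w.length + 1 ∧ j0 + 1 - 1 < K + 1),
      if_neg (by omega : ¬ (s = m + 1 ∧ j0 + 1 - 1 = j0 + 1))]
    have hH2 : pvH2 w m j0 s (j0 + 1 - 1) = pvF w j0 s := by
      simp [pvH2, (by omega : s ≤ m)]
    rw [hH2, hcost s m (by omega) hm]
    rw [pvSet2_MM]
    apply pvMM_congr
    intro a ha b hb
    by_cases h : a = m + 1 ∧ b = j0 + 1
    · rw [if_pos h, if_pos h, pvPmin_succ]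
    · simp [h]

theorem pv_dp_mid (w : List Int) (K : Nat) (cost : List (List Int))
    (hcost : ∀ t i0, t ≤ i0 → i0 < w.length →
      pvGet2 cost t (i0 + 1 - 1) = pvCostF w (t+1) (i0+1))
    (m : Nat) (hm : m < w.length) (c : Nat) (hc : c ≤ K) :
    List.foldl (fun D j0 =>
        List.foldl (fun D t =>
          pvSet2 D (m + 1) (j0 + 1)
            (min (pvGet2 D (m + 1) (j0 + 1))
              (pvGet2 D t (j0 + 1 - 1) + pvGet2 cost t (m + 1 - 1)))) D
          (List.range (m + 1)))
      (pvMM (w.length + 1) (K + 1) (pvH w m)) (List.range c)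
    = pvMM (w.length + 1) (K + 1) (pvH2 w m c) := by
  induction c with
  | zero =>
    simp only [List.range_zero, List.foldl_nil]
    apply pvMM_congr
    intro a ha b hb
    by_cases h : a ≤ m
    · simp [pvH, pvH2, h]
    · simp [pvH, pvH2, h]
      intro ha' hb'
      have hb0 : b = 0 := by omega
      subst hb0; subst ha'
      simp [pvF]
  | succ c ih =>
    rw [List.range_succ (n := c), List.foldl_append, ih (by omega)]
    simp only [List.foldl_cons, List.foldl_nil]
    rw [pv_dp_inner w K cost hcost m c hm (by omega) (m+1) le_rfl]
    apply pvMM_congr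
    intro a ha b hb
    by_cases h : a = m + 1 ∧ b = c + 1
    · obtain ⟨ha', hb'⟩ := h
      subst ha'; subst hb'
      rw [if_pos ⟨rfl, rfl⟩, ← pvF_succ_pos w c (m+1) (by omega)]
      simp [pvH2]
    · rw [if_neg h]
      simp only [pvH2]
      by_cases h1 : a ≤ m
      · simp [h1]
      · rw [if_neg h1, if_neg h1]
        by_cases h2 : a = m + 1 ∧ b ≤ c
        · rw [if_pos h2, if_pos (by omega : a = m + 1 ∧ b ≤ c + 1)]
        · rw [if_neg h2, if_neg (by omega : ¬ (a = m + 1 ∧ b ≤ c + 1))]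

theorem pv_dp_outer (w : List Int) (K : Nat) (cost : List (List Int))
    (hcost : ∀ t i0, t ≤ i0 → i0 < w.length →
      pvGet2 cost t (i0 + 1 - 1) = pvCostF w (t+1) (i0+1))
    (m : Nat) (hm : m ≤ w.length) :
    List.foldl (fun D i0 =>
        List.foldl (fun D j0 =>
          List.foldl (fun D t =>
            pvSet2 D (i0 + 1) (j0 + 1)
              (min (pvGet2 D (i0 + 1) (j0 + 1))
                (pvGet2 D t (j0 + 1 - 1) + pvGet2 cost t (i0 + 1 - 1)))) D
            (List.range (i0 + 1))) D (List.range K))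
      (pvSet2 (List.replicate (w.length + 1) (List.replicate (K + 1) pvINF)) 0 0 0)
      (List.range m)
    = pvMM (w.length + 1) (K + 1) (pvH w m) := by
  induction m with
  | zero =>
    simp only [List.range_zero, List.foldl_nil]
    rw [pvMM_const, pvSet2_MM]
    apply pvMM_congr
    intro a ha b hb
    by_cases h : a = 0 ∧ b = 0
    · obtain ⟨rfl, rfl⟩ := h
      simp [pvH, pvF]
    · rw [if_neg h]
      simp only [pvH]
      by_cases ha0 : a = 0
      · subst ha0
        rw [if_pos (by omega), pvF_arg_zero, if_neg (by omega : ¬ b = 0)]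
      · rw [if_neg (by omega : ¬ a ≤ 0)]
  | succ m ih =>
    rw [List.range_succ (n := m), List.foldl_append, ih (by omega)]
    simp only [List.foldl_cons, List.foldl_nil]
    rw [pv_dp_mid w K cost hcost m (by omega) K le_rfl]
    apply pvMM_congr
    intro a ha b hb
    simp only [pvH2, pvH]
    by_cases h1 : a ≤ m
    · rw [if_pos h1, if_pos (by omega : a ≤ m + 1)]
    · rw [if_neg h1]
      by_cases h2 : a = m + 1
      · rw [if_pos (by omega : a = m + 1 ∧ b ≤ K), if_pos (by omega : a ≤ m + 1)]
      · rw [if_neg (by omega : ¬ (a = m + 1 ∧ b ≤ K)), if_neg (by omega : ¬ a ≤ m + 1)]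

theorem pv_A_eq (w : List Int) (k : Int) : k_server_dp w k = pvF w k.toNat w.length := by
  simp only [k_server_dp]
  rw [pv_pw_eq, pv_pwi_eq]
  rw [pv_cost_inv w _ _ (fun j => pv_if_getD (pvSw w) w.length j)
    (fun j => pv_if_getD (pvSIw w) w.length j) w.length le_rfl]
  rw [pv_dp_outer w k.toNat _
    (fun t i0 ht hi => pv_cost_getD w _ _ (fun j => pv_if_getD (pvSw w) w.length j)
      (fun j => pv_if_getD (pvSIw w) w.length j) t i0 ht hi) w.length le_rfl]
  rw [pvGet2_MM, if_pos (by omega : w.length < w.length + 1 ∧ k.toNat < k.toNat + 1)]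
  simp [pvH]

-- ===== B-side lemmas =====

theorem pvCostF_diag (w : List Int) (a : Nat) : pvCostF w (a+1) (a+1) = 0 := by
  unfold pvCostF
  have hm : (a + 1 + (a + 1)) / 2 = a + 1 := by omega
  rw [hm]
  have h1 : pvSw w (a+1) = pvSw w a + w.getD a 0 := pvPS_succ _ _
  have h2 : pvSIw w (a+1) = pvSIw w a + w.getD a 0 * ((a:Int)+1) := pvPS_succ _ _
  simp only [Nat.add_sub_cancel, h1, h2]
  push_cast
  ring

theorem pvCostF_step_stay (w : List Int) (l e : Nat) (h : l ≤ e) (hp : (l + e) % 2 = 0) :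
    pvCostF w (l+1) (e+2)
      = pvCostF w (l+1) (e+1) + w.getD (e+1) 0 * (((e:Int)+1) - (((l+e)/2 : Nat) : Int)) := by
  unfold pvCostF
  have hm1 : (l + 1 + (e + 2)) / 2 = (l+e)/2 + 1 := by omega
  have hm2 : (l + 1 + (e + 1)) / 2 = (l+e)/2 + 1 := by omega
  rw [hm1, hm2]
  have h1 : pvSw w (e+2) = pvSw w (e+1) + w.getD (e+1) 0 := pvPS_succ _ _
  have h2 : pvSIw w (e+2) = pvSIw w (e+1) + w.getD (e+1) 0 * (((e+1:Nat):Int)+1) := pvPS_succ _ _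
  rw [h1, h2]
  push_cast
  ring

theorem pvCostF_step_adv (w : List Int) (l e : Nat) (h : l ≤ e) (hp : (l + e) % 2 = 1) :
    pvCostF w (l+1) (e+2)
      = pvCostF w (l+1) (e+1)
        + (pvSw w ((l+e)/2 + 1) - pvSw w l) - (pvSw w (e+1) - pvSw w ((l+e)/2 + 1))
        + w.getD (e+1) 0 * (((e:Int)+1) - 1 - (((l+e)/2 : Nat) : Int)) := by
  unfold pvCostF
  have hm1 : (l + 1 + (e + 2)) / 2 = (l+e)/2 + 2 := by omega
  have hm2 : (l + 1 + (e + 1)) / 2 = (l+e)/2 + 1 := by omega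
  rw [hm1, hm2]
  have h1 : pvSw w (e+2) = pvSw w (e+1) + w.getD (e+1) 0 := pvPS_succ _ _
  have h2 : pvSIw w (e+2) = pvSIw w (e+1) + w.getD (e+1) 0 * (((e+1:Nat):Int)+1) := pvPS_succ _ _
  have h3 : pvSw w ((l+e)/2 + 2) = pvSw w ((l+e)/2 + 1) + w.getD ((l+e)/2 + 1) 0 := pvPS_succ _ _
  have h4 : pvSIw w ((l+e)/2 + 2)
      = pvSIw w ((l+e)/2 + 1) + w.getD ((l+e)/2 + 1) 0 * ((((l+e)/2 + 1 : Nat):Int)+1) :=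
    pvPS_succ _ _
  rw [h1, h2, h3, h4]
  simp only [Nat.add_sub_cancel]
  push_cast
  ring

-- closed form of the sliding-median sweep state after q steps
theorem pv_row_inv (w : List Int) (l : Nat) (hl : l < w.length) (q : Nat)
    (hq : l + q < w.length) :
    (List.range q).foldl (pvRowStep w l)
      (l, (0:Int), w.getD l 0, (0:Int), List.replicate w.length (0:Int))
    = (l + q/2,
       pvCostF w (l+1) (l+q+1),
       pvSw w (l + q/2 + 1) - pvSw w l,
       pvSw w (l+q+1) - pvSw w (l + q/2 + 1),
       (List.range w.length).map
         (fun b => if l < b ∧ b ≤ l + q then pvCostF w (l+1) (b+1) else 0)) := by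
  induction q with
  | zero =>
    simp only [List.range_zero, List.foldl_nil, Nat.zero_div, Nat.add_zero]
    have hc : pvCostF w (l+1) (l+1) = 0 := pvCostF_diag w l
    have hL : pvSw w (l+1) = pvSw w l + w.getD l 0 := pvPS_succ _ _
    have hrow : List.replicate w.length (0:Int)
        = (List.range w.length).map
            (fun b => if l < b ∧ b ≤ l then pvCostF w (l+1) (b+1) else 0) := by
      apply List.ext_getElem
      · simp
      · intro i h1 h2
        simp only [List.length_replicate] at h1
        simp only [List.getElem_replicate, List.getElem_map, List.getElem_range]
        rw [if_neg (by omega : ¬ (l < i ∧ i ≤ l))]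
    refine Prod.ext rfl (Prod.ext hc.symm (Prod.ext ?_ (Prod.ext ?_ hrow)))
    · show w.getD l 0 = pvSw w (l+1) - pvSw w l
      rw [hL]; ring
    · show (0:Int) = pvSw w (l+1) - pvSw w (l+1)
      ring
  | succ q ih =>
    rw [List.range_succ, List.foldl_append, ih (by omega)]
    simp only [List.foldl_cons, List.foldl_nil]
    unfold pvRowStep
    simp only []
    have e1 : l + 1 + q = l + q + 1 := by omega
    have hSw : pvSw w (l+(q+1)+1) = pvSw w (l+q+1) + w.getD (l+q+1) 0 := by
      rw [(by omega : l+(q+1)+1 = l+q+1+1)]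
      exact pvPS_succ _ _
    rcases Nat.even_or_odd q with hev | hod
    · -- q even: (l + (l+1+q)) odd → else branch (median stays)
      have hq2 : q % 2 = 0 := Nat.even_iff.mp hev
      have hbr : ¬ ((l + (l + 1 + q)) % 2 = 0) := by omega
      rw [if_neg hbr]
      have hstep := pvCostF_step_stay w l (l+q) (by omega) (by omega)
      have hm : (l + (l+q))/2 = l + q/2 := by omega
      rw [hm] at hstep
      refine Prod.ext (by omega) (Prod.ext ?_ (Prod.ext (by rw [(by omega : l + (q+1)/2 = l + q/2)]) (Prod.ext ?_ ?_)))
      · rw [e1, (by omega : l+(q+1)+1 = l+q+2), hstep]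
        push_cast
        ring
      · rw [e1, (by omega : l + (q+1)/2 + 1 = l + q/2 + 1), hSw]
        ring
      · rw [pv_set_map_range]
        apply List.map_congr_left
        intro b hb
        simp only [List.mem_range] at hb
        by_cases hbe : b = l+1+q
        · rw [if_pos hbe, if_pos (by omega : l < b ∧ b ≤ l + (q+1)),
            (by omega : b + 1 = l+q+2), hstep, e1]
          push_cast
          ring
        · rw [if_neg hbe]
          by_cases hin : l < b ∧ b ≤ l + q
          · rw [if_pos hin, if_pos (by omega : l < b ∧ b ≤ l + (q+1))]
          · rw [if_neg hin, if_neg (by omega : ¬ (l < b ∧ b ≤ l + (q+1)))]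
    · -- q odd: (l + (l+1+q)) even → advance branch (median slides right)
      have hq2 : q % 2 = 1 := Nat.odd_iff.mp hod
      have hbr : (l + (l + 1 + q)) % 2 = 0 := by omega
      rw [if_pos hbr]
      have hstep := pvCostF_step_adv w l (l+q) (by omega) (by omega)
      have hm : (l + (l+q))/2 = l + q/2 := by omega
      rw [hm] at hstep
      have hSwm : pvSw w (l + q/2 + 1 + 1) = pvSw w (l + q/2 + 1) + w.getD (l + q/2 + 1) 0 :=
        pvPS_succ _ _
      refine Prod.ext (by omega) (Prod.ext ?_ (Prod.ext ?_ (Prod.ext ?_ ?_)))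
      · rw [e1, (by omega : l+(q+1)+1 = l+q+2), hstep]
        push_cast
        ring
      · rw [(by omega : l + (q+1)/2 + 1 = l + q/2 + 1 + 1), hSwm]
        ring
      · rw [e1, (by omega : l + (q+1)/2 + 1 = l + q/2 + 1 + 1), hSwm, hSw]
        ring
      · rw [pv_set_map_range]
        apply List.map_congr_left
        intro b hb
        simp only [List.mem_range] at hb
        by_cases hbe : b = l+1+q
        · rw [if_pos hbe, if_pos (by omega : l < b ∧ b ≤ l + (q+1)),
            (by omega : b + 1 = l+q+2), hstep, e1]
          push_cast
          ring
        · rw [if_neg hbe]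
          by_cases hin : l < b ∧ b ≤ l + q
          · rw [if_pos hin, if_pos (by omega : l < b ∧ b ≤ l + (q+1))]
          · rw [if_neg hin, if_neg (by omega : ¬ (l < b ∧ b ≤ l + (q+1)))]

theorem pv_build_map {α : Type} (g : Nat → α) (m : Nat) :
    List.foldl (fun acc l => acc ++ [g l]) ([] : List α) (List.range m)
      = (List.range m).map g := by
  induction m with
  | zero => simp
  | succ m ih => rw [List.range_succ, List.foldl_append, ih, List.map_append]; simp

-- B's cost matrix equals the interval-cost matrix
theorem pv_costB_eq (w : List Int) :
    (List.range w.length).foldl (fun cost l =>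
      cost ++ [((List.range (w.length - (l+1))).foldl (pvRowStep w l)
        (l, (0:Int), w.getD l 0, (0:Int), List.replicate w.length (0:Int))).2.2.2.2])
      ([] : List (List Int))
    = pvMM w.length w.length
        (fun a b => if a < b then pvCostF w (a+1) (b+1) else 0) := by
  have hb := pv_build_map (g := fun l =>
    ((List.range (w.length - (l+1))).foldl (pvRowStep w l)
      (l, (0:Int), w.getD l 0, (0:Int), List.replicate w.length (0:Int))).2.2.2.2) w.length
  rw [hb]
  unfold pvMM
  apply List.map_congr_left
  intro l hl
  simp at hl
  rw [pv_row_inv w l hl (w.length - (l+1)) (by omega)]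
  apply List.map_congr_left
  intro b hb'
  simp at hb'
  by_cases h : l < b
  · rw [if_pos (by omega : l < b ∧ b ≤ l + (w.length - (l+1)))]
    simp [h]
  · rw [if_neg (by omega : ¬ (l < b ∧ b ≤ l + (w.length - (l+1))))]
    simp [h]

theorem pv_costB_getD (w : List Int) (t i0 : Nat) (ht : t ≤ i0) (hi : i0 < w.length) :
    pvGet2 (pvMM w.length w.length
        (fun a b => if a < b then pvCostF w (a+1) (b+1) else 0)) t (i0 + 1 - 1)
      = pvCostF w (t+1) (i0+1) := by
  rw [pvGet2_MM, if_pos (by omega : t < w.length ∧ i0 + 1 - 1 < w.length)]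
  simp only [Nat.add_sub_cancel]
  by_cases h : t < i0
  · rw [if_pos h]
  · have : t = i0 := by omega
    subst this
    rw [if_neg (by omega)]
    exact (pvCostF_diag w t).symm

theorem pv_if_min (a v : Int) : (if v < a then v else a) = min a v := by
  by_cases h : v < a
  · rw [if_pos h, min_eq_right (le_of_lt h)]
  · rw [if_neg h, min_eq_left (not_lt.mp h)]

theorem pv_best_eq (w : List Int) (j i0 : Nat) (hi : i0 < w.length) (prev : List Int)
    (hprev : prev = (List.range (w.length+1)).map (fun a => pvF w j a)) (s : Nat)
    (hs : s ≤ i0 + 1) :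
    (List.range s).foldl (fun best t =>
        let v := prev.getD t 0 + pvGet2 (pvMM w.length w.length
          (fun a b => if a < b then pvCostF w (a+1) (b+1) else 0)) t (i0 + 1 - 1)
        if v < best then v else best) pvINF
      = pvPmin w j (i0+1) s := by
  induction s with
  | zero => simp [pvPmin]
  | succ s ih =>
    rw [List.range_succ, List.foldl_append, ih (by omega)]
    simp only [List.foldl_cons, List.foldl_nil]
    rw [hprev, pv_getD_map_range, if_pos (by omega : s < w.length + 1),
      pv_costB_getD w s i0 (by omega) hi, pv_if_min, pvPmin_succ]

theorem pv_cur_eq (w : List Int) (j : Nat) (prev : List Int)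
    (hprev : prev = (List.range (w.length+1)).map (fun a => pvF w j a)) (p : Nat)
    (hp : p ≤ w.length) :
    (List.range p).foldl (fun cur i0 =>
        cur.set (i0+1) ((List.range (i0+1)).foldl (fun best t =>
          let v := prev.getD t 0 + pvGet2 (pvMM w.length w.length
            (fun a b => if a < b then pvCostF w (a+1) (b+1) else 0)) t (i0 + 1 - 1)
          if v < best then v else best) pvINF))
      (List.replicate (w.length+1) pvINF)
    = (List.range (w.length+1)).map
        (fun a => if 1 ≤ a ∧ a ≤ p then pvF w (j+1) a else pvINF) := by
  induction p with
  | zero =>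
    simp only [List.range_zero, List.foldl_nil]
    apply List.ext_getElem
    · simp
    · intro i h1 h2
      simp only [List.length_replicate] at h1
      simp only [List.getElem_replicate, List.getElem_map, List.getElem_range]
      rw [if_neg (by omega : ¬ (1 ≤ i ∧ i ≤ 0))]
  | succ p ih =>
    rw [List.range_succ (n := p), List.foldl_append, ih (by omega)]
    simp only [List.foldl_cons, List.foldl_nil]
    rw [pv_best_eq w j p (by omega) prev hprev (p+1) le_rfl,
      ← pvF_succ_pos w j (p+1) (by omega), pv_set_map_range]
    apply List.map_congr_left
    intro a ha
    simp at ha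
    by_cases hae : a = p + 1
    · rw [if_pos hae, if_pos (by omega : 1 ≤ a ∧ a ≤ p + 1), hae]
    · rw [if_neg hae]
      by_cases hin : 1 ≤ a ∧ a ≤ p
      · rw [if_pos hin, if_pos (by omega : 1 ≤ a ∧ a ≤ p + 1)]
      · rw [if_neg hin, if_neg (by omega : ¬ (1 ≤ a ∧ a ≤ p + 1))]

theorem pv_layer_inv (w : List Int) (K : Nat) :
    (List.range K).foldl (fun prev _ =>
        (List.range w.length).foldl (fun cur i0 =>
          cur.set (i0+1) ((List.range (i0+1)).foldl (fun best t =>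
            let v := prev.getD t 0 + pvGet2 (pvMM w.length w.length
              (fun a b => if a < b then pvCostF w (a+1) (b+1) else 0)) t (i0 + 1 - 1)
            if v < best then v else best) pvINF))
          (List.replicate (w.length+1) pvINF))
      ((0:Int) :: List.replicate w.length pvINF)
    = (List.range (w.length+1)).map (fun a => pvF w K a) := by
  induction K with
  | zero =>
    simp only [List.range_zero, List.foldl_nil]
    apply List.ext_getElem
    · simp
    · intro i h1 h2
      cases i with
      | zero => simp [pvF]
      | succ i =>
        simp at h1
        simp [pvF, List.getElem_cons_succ, List.getElem_replicate]
  | succ K ih =>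
    rw [List.range_succ (n := K), List.foldl_append, ih]
    simp only [List.foldl_cons, List.foldl_nil]
    rw [pv_cur_eq w K _ rfl w.length le_rfl]
    apply List.map_congr_left
    intro a ha
    simp at ha
    by_cases h : 1 ≤ a ∧ a ≤ w.length
    · rw [if_pos h]
    · have ha0 : a = 0 := by omega
      subst ha0
      rw [if_neg h, pvF_arg_zero, if_neg (by omega : ¬ K + 1 = 0)]

theorem pv_B_eq (w : List Int) (k : Int) : k_server_dp_alt w k = pvF w k.toNat w.length := by
  simp only [k_server_dp_alt]
  rw [pv_costB_eq w, pv_layer_inv w k.toNat, pv_getD_map_range,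
    if_pos (by omega : w.length < w.length + 1)]

-- ===== VERDICT (by name: the statement is the Claim_ definition above) =====
theorem k_server_dp_spec : Claim_equal_k_server_dp := by
  intro w k _ _
  unfold Spec_k_server_dp
  rw [pv_A_eq, pv_B_eq]
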